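-- pv_equiv track=rewrite | github.com/thecodingdad/ha-xtool | custom_components/xtool/firmware.py | _md_hardbreaks
-- ===== SOURCE A (Python) =====
-- def _md_hardbreaks(text: str) -> str:
--     """Convert plain text into markdown that preserves line breaks.
--
--     The cloud release-note descriptions arrive with single ``\\n`` between
--     lines. Markdown collapses single newlines into spaces — only blank
--     lines (``\\n\\n``) start a new paragraph — so the dialog rendering
--     drops the breaks. Append two trailing spaces before each lone newline
--     to force a markdown hard break.
--     """
--     if not text:
--         return text
--     out: list[str] = []
--     lines = text.split("\n")
--     for i, line in enumerate(lines):
--         out.append(line)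
--         if i < len(lines) - 1:
--             # If the next line is empty, leave it as a paragraph break.
--             # Otherwise insert a hard break (two spaces + newline).
--             nxt = lines[i + 1]
--             if nxt.strip() == "":
--                 out.append("\n")
--             else:
--                 out.append("  \n")
--     return "".join(out)
-- ===== SOURCE B (Python) =====
-- def _md_hardbreaks(text: str) -> str:
--     # Single right-to-left character pass: no split, no index arithmetic.
--     # has_ink tracks whether the line to the right of the cursor contains
--     # a non-whitespace character; each "\n" before such a line becomes a
--     # markdown hard break ("  \n"), newlines before blank lines stay plain.
--     res = []
--     has_ink = False
--     for c in reversed(text):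
--         if c == "\n":
--             res.append("\n")
--             if has_ink:
--                 res.append("  ")
--             has_ink = False
--         else:
--             res.append(c)
--             if not c.isspace():
--                 has_ink = True
--     return "".join(reversed(res))
-- ===== Notes on version B (the rewrite author's own statement) =====
-- stated objective: alternative
-- what changed: Replaced split-into-lines plus an index loop with lines[i+1] lookahead by a single right-to-left character scan that carries one boolean (does the line to the right contain non-whitespace), so no line list, enumerate or indexing is built at all.
import Mathlib
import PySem

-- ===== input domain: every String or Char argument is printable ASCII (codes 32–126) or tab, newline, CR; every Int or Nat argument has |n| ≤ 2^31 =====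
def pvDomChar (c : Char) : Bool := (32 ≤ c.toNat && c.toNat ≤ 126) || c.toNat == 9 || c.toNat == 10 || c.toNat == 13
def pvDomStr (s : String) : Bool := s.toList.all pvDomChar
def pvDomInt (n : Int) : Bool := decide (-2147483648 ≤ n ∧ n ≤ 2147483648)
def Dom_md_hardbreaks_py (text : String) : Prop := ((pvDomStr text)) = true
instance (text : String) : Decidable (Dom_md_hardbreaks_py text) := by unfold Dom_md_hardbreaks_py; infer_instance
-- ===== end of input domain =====

-- B replaces A's split-into-lines + indexed lookahead loop by one right-to-left
-- character scan carrying a single boolean; alternative decomposition, same cost.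

-- ===== PORT A =====
-- hand port of text.split("\n") (PySem.Chars.splitOn is fuel-based; this
-- structural recursion is exact for the one-character separator "\n")
def pvSplitNL : List Char → List (List Char)
  | [] => [[]]
  | c :: rest =>
    if c = '\n' then [] :: pvSplitNL rest
    else
      match pvSplitNL rest with
      | [] => [[c]]
      | h :: t => (c :: h) :: t

-- the 'for i, line in enumerate(lines)' loop, accumulating 'out'
def pvALoop (lines : List (List Char)) : List (Int × List Char) → List (List Char) → List (List Char)
  | [], out => out
  | (i, line) :: rest, out =>
    let out := out ++ [line]
    let out :=
      if i < (lines.length : Int) - 1 then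
        let nxt := (PySem.List.pyGet? lines (i + 1)).getD []
        if PySem.Chars.strip nxt = [] then out ++ [['\n']] else out ++ [[' ', ' ', '\n']]
      else out
    pvALoop lines rest out

def md_hardbreaks_py (text : String) : String :=
  if text = "" then text
  else
    let lines := pvSplitNL text.toList
    String.ofList (PySem.Chars.join [] (pvALoop lines (PySem.List.enumerate lines 0) []))

-- ===== PORT B =====
-- the 'for c in reversed(text)' loop of Source B; state = (res pieces, has_ink)
def pvBLoop : List Char → List (List Char) × Bool → List (List Char) × Bool
  | [], st => st
  | c :: rest, st =>
    let st' :=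
      if c = '\n' then
        let res := st.1 ++ [['\n']]
        ((if st.2 then res ++ [[' ', ' ']] else res), false)
      else
        (st.1 ++ [[c]], st.2 || !(PySem.Chars.isspace c))
    pvBLoop rest st'

def md_hardbreaks_py_alt (text : String) : String :=
  let st := pvBLoop text.toList.reverse ([], false)
  String.ofList (PySem.Chars.join [] st.1.reverse)

-- ===== PRECONDITION & SPEC =====
def Spec_md_hardbreaks_py (text : String) (out : String) : Prop := out = md_hardbreaks_py_alt text
instance (text : String) (out : String) : Decidable (Spec_md_hardbreaks_py text out) := by unfold Spec_md_hardbreaks_py; infer_instance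

-- ===== CLAIM (what is proved, stated in full; the proofs are below) =====
def Claim_equal_md_hardbreaks_py : Prop := ∀ (text : String), Dom_md_hardbreaks_py text → Spec_md_hardbreaks_py text (md_hardbreaks_py text)

-- ===== LEMMAS AND PROOFS =====

-- proof-side spec functions
def pvInk (cs : List Char) : Bool :=
  (cs.takeWhile (· ≠ '\n')).any (fun d => !PySem.Chars.isspace d)

def pvBOut : List Char → List Char
  | [] => []
  | c :: rest =>
    if c = '\n' then
      (if pvInk rest then ' ' :: ' ' :: '\n' :: pvBOut rest else '\n' :: pvBOut rest)
    else c :: pvBOut rest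

def pvGsep (l : List Char) : List Char :=
  if PySem.Chars.strip l = [] then ['\n'] else [' ', ' ', '\n']

def pvG : List (List Char) → List Char
  | [] => []
  | [l] => l
  | l :: l' :: rest => l ++ pvGsep l' ++ pvG (l' :: rest)

def pvAPieces : List (List Char) → List (List Char)
  | [] => []
  | [l] => [l]
  | l :: l' :: rest => l :: pvGsep l' :: pvAPieces (l' :: rest)

-- "".join with empty separator is flatten
theorem pvJoinNil (l : List (List Char)) : PySem.Chars.join [] l = l.flatten := by
  induction l with
  | nil => rfl
  | cons h t ih =>
    cases t with
    | nil => simp [PySem.Chars.join, List.intercalate]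
    | cons h' t' =>
      simp only [PySem.Chars.join, List.intercalate] at ih ⊢
      simp [List.intersperse, List.flatten] at ih ⊢
      exact ih

-- B-side: the fold splits over append
theorem pvBLoop_append (xs ys : List Char) (st : List (List Char) × Bool) :
    pvBLoop (xs ++ ys) st = pvBLoop ys (pvBLoop xs st) := by
  induction xs generalizing st with
  | nil => rfl
  | cons c rest ih => simp only [List.cons_append, pvBLoop]; exact ih _

-- B-side: the reversed scan computes pvBOut and tracks pvInk
theorem pvBLoop_spec (cs : List Char) :
    (pvBLoop cs.reverse ([], false)).1.reverse.flatten = pvBOut cs ∧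
    (pvBLoop cs.reverse ([], false)).2 = pvInk cs := by
  induction cs with
  | nil => exact ⟨rfl, rfl⟩
  | cons c rest ih =>
    rw [List.reverse_cons, pvBLoop_append]
    obtain ⟨ih1, ih2⟩ := ih
    by_cases hc : c = '\n'
    · subst hc
      cases hB : (pvBLoop rest.reverse ([], false)).2 <;>
        refine ⟨?_, by simp [pvBLoop, pvInk]⟩ <;>
        simp [pvBLoop, pvBOut, ← ih2, hB, ih1]
    · refine ⟨?_, ?_⟩
      · simp [pvBLoop, hc, pvBOut, ih1]
      · simp only [pvBLoop, ih2, pvInk, List.takeWhile_cons]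
        simp [hc, Bool.or_comm]

theorem pvBalt (text : String) :
    md_hardbreaks_py_alt text = String.ofList (pvBOut text.toList) := by
  have h := pvBLoop_spec text.toList
  simp only [md_hardbreaks_py_alt, pvJoinNil, h.1]

-- the head of split("\n") is takeWhile (· ≠ '\n')
theorem pvSplitNL_head (cs : List Char) :
    ∃ t, pvSplitNL cs = (cs.takeWhile (· ≠ '\n')) :: t := by
  induction cs with
  | nil => exact ⟨[], rfl⟩
  | cons c rest ih =>
    by_cases hc : c = '\n'
    · subst hc
      exact ⟨pvSplitNL rest, by simp [pvSplitNL]⟩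
    · obtain ⟨t, ht⟩ := ih
      refine ⟨t, ?_⟩
      simp [pvSplitNL, ht, hc]

theorem pvG_cons (c : Char) (h : List Char) (t : List (List Char)) :
    pvG ((c :: h) :: t) = c :: pvG (h :: t) := by
  cases t with
  | nil => rfl
  | cons l' r => simp [pvG]

-- strip l = [] iff l is all whitespace
theorem pvStripNil (l : List Char) :
    (PySem.Chars.strip l = []) ↔ (∀ c ∈ l, PySem.Chars.isspace c = true) := by
  simp only [PySem.Chars.strip, PySem.Chars.lstrip, PySem.Chars.rstrip,
    List.reverse_eq_nil_iff, List.dropWhile_eq_nil_iff, List.mem_reverse]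
  constructor
  · intro h c hc
    have hsplit := List.takeWhile_append_dropWhile (p := PySem.Chars.isspace) (l := l)
    rw [← hsplit, List.mem_append] at hc
    rcases hc with hc | hc
    · exact List.mem_takeWhile_imp hc
    · exact h c hc
  · intro h c hc
    exact h c ((List.dropWhile_sublist (p := PySem.Chars.isspace) (l := l)).subset hc)

-- core: B's direct scan equals A's line decomposition
theorem pvMain (cs : List Char) : pvBOut cs = pvG (pvSplitNL cs) := by
  induction cs with
  | nil => rfl
  | cons c rest ih =>
    by_cases hc : c = '\n'
    · subst hc
      obtain ⟨t, ht⟩ := pvSplitNL_head rest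
      have hspl : pvSplitNL ('\n' :: rest) = [] :: (rest.takeWhile (· ≠ '\n')) :: t := by
        simp [pvSplitNL, ht]
      rw [hspl]
      rw [ht] at ih
      have hink : pvInk rest = true ↔ ¬ PySem.Chars.strip (rest.takeWhile (· ≠ '\n')) = [] := by
        rw [pvStripNil, pvInk]
        simp [List.any_eq_true]
      have hG : pvG ([] :: rest.takeWhile (· ≠ '\n') :: t) =
          pvGsep (rest.takeWhile (· ≠ '\n')) ++ pvG (rest.takeWhile (· ≠ '\n') :: t) := by
        simp [pvG]
      rw [hG, ← ih]
      show (if pvInk rest then ' ' :: ' ' :: '\n' :: pvBOut rest else '\n' :: pvBOut rest) = _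
      by_cases hp : pvInk rest = true
      · have hs : ¬ PySem.Chars.strip (rest.takeWhile (· ≠ '\n')) = [] := hink.mp hp
        rw [if_pos hp]
        simp only [pvGsep, if_neg hs]
        rfl
      · have hs : PySem.Chars.strip (rest.takeWhile (· ≠ '\n')) = [] := by
          by_contra hne
          exact hp (hink.mpr hne)
        rw [if_neg hp]
        simp only [pvGsep, if_pos hs]
        rfl
    · obtain ⟨t, ht⟩ := pvSplitNL_head rest
      simp only [pvSplitNL, if_neg hc, ht]
      rw [pvG_cons, ← ht, ← ih]
      simp [pvBOut, hc]

-- A-side: the enumerate loop appends pvAPieces of the remaining lines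
theorem pvALoop_spec (lines : List (List Char)) (xs : List (List Char)) (k : Nat)
    (acc : List (List Char)) (hdrop : lines.drop k = xs) :
    pvALoop lines (PySem.List.enumerate xs (k : Int)) acc = acc ++ pvAPieces xs := by
  induction xs generalizing k acc with
  | nil => simp [PySem.List.enumerate, pvALoop, pvAPieces]
  | cons line rest ih =>
    have hk : k < lines.length := by
      by_contra hle
      simp [List.drop_eq_nil_of_le (Nat.le_of_not_lt hle)] at hdrop
    have hrest : lines.drop (k + 1) = rest := by
      have h2 := congrArg List.tail hdrop
      rwa [List.tail_drop] at h2
    have hcast : ((k : Int) + 1) = ((k + 1 : Nat) : Int) := by push_cast; ring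
    rw [PySem.List.enumerate_cons]
    simp only [pvALoop]
    cases rest with
    | nil =>
      have hlen : lines.length = k + 1 := by
        have := List.drop_eq_nil_iff.mp hrest
        omega
      rw [if_neg (by rw [hlen]; omega)]
      simp [PySem.List.enumerate, pvALoop, pvAPieces]
    | cons l' r =>
      have hlt : k + 1 < lines.length := by
        by_contra hle
        simp [List.drop_eq_nil_of_le (Nat.le_of_not_lt hle)] at hrest
      rw [if_pos (by push_cast; omega)]
      have hget : PySem.List.pyGet? lines ((k : Int) + 1) = some l' := by
        rw [hcast, PySem.List.pyGet?_natCast]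
        have hg : lines[k + 1]? = (lines.drop (k + 1))[0]? := by
          rw [List.getElem?_drop]
        rw [hg, hrest]
        rfl
      rw [hget, hcast, ih (k + 1) _ hrest]
      by_cases hs : PySem.Chars.strip l' = [] <;>
        simp [hs, pvAPieces, pvGsep]

theorem pvAPieces_flatten (ls : List (List Char)) : (pvAPieces ls).flatten = pvG ls := by
  induction ls with
  | nil => rfl
  | cons l t ih =>
    cases t with
    | nil => simp [pvAPieces, pvG]
    | cons l' r => simp [pvAPieces, pvG, ← ih]

-- ===== VERDICT (by name: the statement is the Claim_ definition above) =====
theorem md_hardbreaks_py_spec : Claim_equal_md_hardbreaks_py := by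
  intro text _
  unfold Spec_md_hardbreaks_py
  by_cases h : text = ""
  · subst h; rfl
  · rw [pvBalt, pvMain]
    simp only [md_hardbreaks_py, if_neg h]
    rw [pvJoinNil]
    have := pvALoop_spec (pvSplitNL text.toList) (pvSplitNL text.toList) 0 [] (by simp)
    rw [show ((0 : Nat) : Int) = 0 by rfl] at this
    rw [this, List.nil_append, pvAPieces_flatten]
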